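-- pv_equiv track=rewrite | github.com/had3s-dev/Nexufy | main.py | validate_cookies_file
-- ===== SOURCE A (Python) =====
-- def validate_cookies_file(content):
--     """Validate that uploaded content is a proper cookies file"""
--     lines = content.strip().split('\n')
--
--     # Check for Netscape header
--     if not lines[0].startswith('# Netscape HTTP Cookie File'):
--         return False, "Invalid format: Missing Netscape header"
--
--     # Check for YouTube/Google cookies
--     has_youtube_cookies = False
--     valid_lines = 0
--
--     for line in lines[1:]:  # Skip header
--         if line.startswith('#') or not line.strip():
--             continue
--
--         parts = line.split('\t')
--         if len(parts) >= 7: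
--             domain = parts[0]
--             if 'youtube.com' in domain or 'google.com' in domain:
--                 has_youtube_cookies = True
--             valid_lines += 1
--         else:
--             return False, f"Invalid line format: {line[:50]}..."
--
--     if not has_youtube_cookies:
--         return False, "No YouTube/Google cookies found"
--
--     if valid_lines < 3:
--         return False, "Too few valid cookies"
--
--     return True, f"Valid cookies file with {valid_lines} cookies"
-- ===== SOURCE B (Python) =====
-- def validate_cookies_file(content):
--     """Validate that uploaded content is a proper cookies file"""
--     lines = content.strip().split('\n')
--
--     if not lines[0].startswith('# Netscape HTTP Cookie File'):
--         return False, "Invalid format: Missing Netscape header"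
--
--     # relevant = the non-comment, non-blank data lines
--     relevant = [line for line in lines[1:]
--                 if not line.startswith('#') and line.strip()]
--
--     bad = next((line for line in relevant if len(line.split('\t')) < 7), None)
--     if bad is not None:
--         return False, f"Invalid line format: {bad[:50]}..."
--
--     if not any('youtube.com' in line.split('\t')[0] or 'google.com' in line.split('\t')[0]
--                for line in relevant):
--         return False, "No YouTube/Google cookies found"
--
--     if len(relevant) < 3:
--         return False, "Too few valid cookies"
--
--     return True, f"Valid cookies file with {len(relevant)} cookies"
-- ===== Notes on version B (the rewrite author's own statement) =====
-- stated objective: simpler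
-- what changed: Replaces the single fused loop carrying two mutable accumulators and an early return by a declarative pipeline: filter the relevant lines once, report the first malformed one via next(), then express the checks as any() and len() over the filtered list.
import Mathlib
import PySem

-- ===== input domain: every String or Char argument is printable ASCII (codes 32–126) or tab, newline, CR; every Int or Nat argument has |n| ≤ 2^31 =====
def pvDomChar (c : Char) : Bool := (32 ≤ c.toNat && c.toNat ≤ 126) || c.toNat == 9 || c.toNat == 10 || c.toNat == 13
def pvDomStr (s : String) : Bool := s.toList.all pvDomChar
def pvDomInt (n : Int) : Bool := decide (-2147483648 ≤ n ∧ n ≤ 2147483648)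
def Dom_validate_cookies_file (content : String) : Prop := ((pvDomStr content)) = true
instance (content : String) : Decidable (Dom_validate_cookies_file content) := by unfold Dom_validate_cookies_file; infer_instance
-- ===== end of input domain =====

-- B replaces A's fused loop (two accumulators + early return) by a filter / find-first / any / length pipeline; objective: simpler.


-- shared transliteration of `content.strip().split('\n')` ('\n' ≠ "", so split? is always `some`)
def pvLines (content : String) : List String :=
  (PySem.Str.split? (PySem.Str.strip content) "\n").getD [""]

-- ===== PORT A =====
-- the body of A's `for line in lines[1:]` with its two accumulators and both final checks
def pvLoopA : List String → Bool → Int → Bool × String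
  | [], hasYt, valid =>
    if !hasYt then (false, "No YouTube/Google cookies found")
    else if valid < 3 then (false, "Too few valid cookies")
    else (true, "Valid cookies file with " ++ PySem.Int.toStr valid ++ " cookies")
  | line :: rest, hasYt, valid =>
    if PySem.Str.startswith line "#" || PySem.Str.strip line == "" then
      pvLoopA rest hasYt valid
    else
      let parts := (PySem.Str.split? line "\t").getD []
      if parts.length ≥ 7 then
        let domain := parts.headD ""
        pvLoopA rest
          (hasYt || (PySem.Str.isIn "youtube.com" domain || PySem.Str.isIn "google.com" domain))
          (valid + 1)
      else
        (false, "Invalid line format: " ++ PySem.Str.slice line none (some 50) ++ "...")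

def validate_cookies_file (content : String) : Bool × String :=
  let lines := pvLines content
  -- lines[0]: split('\n') always returns a nonempty list, so this is its head
  if !PySem.Str.startswith (lines.headD "") "# Netscape HTTP Cookie File" then
    (false, "Invalid format: Missing Netscape header")
  else
    pvLoopA lines.tail false 0

-- ===== PORT B =====
def pvParts (line : String) : List String := (PySem.Str.split? line "\t").getD []

def pvRelevant (line : String) : Bool :=
  !(PySem.Str.startswith line "#") && !(PySem.Str.strip line == "")

def pvHasYt (line : String) : Bool :=
  PySem.Str.isIn "youtube.com" ((pvParts line).headD "")
    || PySem.Str.isIn "google.com" ((pvParts line).headD "")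

def validate_cookies_file_alt (content : String) : Bool × String :=
  let lines := pvLines content
  if !PySem.Str.startswith (lines.headD "") "# Netscape HTTP Cookie File" then
    (false, "Invalid format: Missing Netscape header")
  else
    let relevant := lines.tail.filter pvRelevant
    match relevant.find? (fun l => (pvParts l).length < 7) with
    | some bad => (false, "Invalid line format: " ++ PySem.Str.slice bad none (some 50) ++ "...")
    | none =>
      if !relevant.any pvHasYt then (false, "No YouTube/Google cookies found")
      else if (relevant.length : Int) < 3 then (false, "Too few valid cookies")
      else (true, "Valid cookies file with " ++ PySem.Int.toStr (relevant.length : Int) ++ " cookies")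

-- ===== PRECONDITION & SPEC =====
def Spec_validate_cookies_file (content : String) (out : Bool × String) : Prop := out = validate_cookies_file_alt content
instance (content : String) (out : Bool × String) : Decidable (Spec_validate_cookies_file content out) := by unfold Spec_validate_cookies_file; infer_instance

-- ===== CLAIM (what is proved, stated in full; the proofs are below) =====
def Claim_equal_validate_cookies_file : Prop := ∀ (content : String), Dom_validate_cookies_file content → Spec_validate_cookies_file content (validate_cookies_file content)

-- ===== LEMMAS AND PROOFS =====

-- the result of B's pipeline after the header check, on an arbitrary loop state of A
def pvTailB (rest : List String) (hasYt : Bool) (valid : Int) : Bool × String :=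
  let relevant := rest.filter pvRelevant
  match relevant.find? (fun l => (pvParts l).length < 7) with
  | some bad => (false, "Invalid line format: " ++ PySem.Str.slice bad none (some 50) ++ "...")
  | none =>
    if !(hasYt || relevant.any pvHasYt) then (false, "No YouTube/Google cookies found")
    else if valid + (relevant.length : Int) < 3 then (false, "Too few valid cookies")
    else (true, "Valid cookies file with " ++ PySem.Int.toStr (valid + (relevant.length : Int)) ++ " cookies")

theorem pvLoopA_eq_pvTailB (rest : List String) (hasYt : Bool) (valid : Int) :
    pvLoopA rest hasYt valid = pvTailB rest hasYt valid := by
  induction rest generalizing hasYt valid with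
  | nil => simp [pvLoopA, pvTailB]
  | cons line rest ih =>
    by_cases hskip : (PySem.Str.startswith line "#" || PySem.Str.strip line == "") = true
    · have hrel : pvRelevant line = false := by
        rcases Bool.or_eq_true_iff.mp hskip with h | h
        · simp only [pvRelevant, h, Bool.not_true, Bool.false_and]
        · simp only [pvRelevant, h, Bool.not_true, Bool.and_false]
      simp only [pvLoopA, hskip, if_pos, ih]
      simp only [pvTailB, List.filter_cons, hrel, Bool.false_eq_true, if_false]
    · have hsw : PySem.Str.startswith line "#" = false := by
        rcases Bool.not_eq_true _ ▸ hskip with h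
        exact Bool.or_eq_false_iff.mp h |>.1
      have hst : (PySem.Str.strip line == "") = false := by
        rcases Bool.not_eq_true _ ▸ hskip with h
        exact Bool.or_eq_false_iff.mp h |>.2
      have hrel : pvRelevant line = true := by
        simp only [pvRelevant, hsw, hst, Bool.not_false, Bool.and_self]
      by_cases hlen : ((PySem.Str.split? line "\t").getD []).length ≥ 7
      · have hbad : decide ((((PySem.Str.split? line "\t").getD []).length < 7)) = false := by
          simp only [decide_eq_false_iff_not]; omega
        simp only [pvLoopA, hskip, Bool.false_eq_true, if_false, hlen, if_pos, ih]
        simp only [pvTailB, List.filter_cons, hrel, if_pos]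
        rw [List.find?_cons_of_neg (by simpa [pvParts] using hbad)]
        simp only [List.any_cons, List.length_cons, pvHasYt, pvParts, Bool.or_assoc,
          Nat.cast_add, Nat.cast_one, add_assoc]
        rw [add_comm (1 : Int) ((List.filter pvRelevant rest).length : Int)]
      · have hbad : decide ((((PySem.Str.split? line "\t").getD []).length < 7)) = true := by
          simp only [decide_eq_true_eq]; omega
        simp only [pvLoopA, hskip, Bool.false_eq_true, if_false, hlen, if_false]
        simp only [pvTailB, List.filter_cons, hrel, if_pos]
        rw [List.find?_cons_of_pos (by simpa [pvParts] using hbad)]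

-- ===== VERDICT (by name: the statement is the Claim_ definition above) =====
theorem validate_cookies_file_spec : Claim_equal_validate_cookies_file := by
  intro content _
  simp only [Spec_validate_cookies_file, validate_cookies_file, validate_cookies_file_alt]
  split
  · rfl
  · rw [pvLoopA_eq_pvTailB]
    simp only [pvTailB, Bool.false_or, zero_add]
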